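-- pv_equiv track=rewrite | github.com/hridaya311/insightguard-backend | scripts/eval_s3_run_verified.py | infer_mapping
-- ===== SOURCE A (Python) =====
-- def infer_mapping(rows: list[dict]):
--     """
--     We assume finance variance tables typically have:
--       - category/name/line_item
--       - actual
--       - budget/baseline/forecast
--     """
--     cols = set()
--     for r in rows:
--         cols.update(r.keys())
--
--     def pick(candidates):
--         for c in candidates:
--             if c in cols:
--                 return c
--         return None
--
--     category_col = pick(["category", "Category", "line_item", "lineItem", "account", "Account", "name", "Name"])
--     actual_col = pick(["actual", "Actual", "value", "Value"])
--     baseline_col = pick(["budget", "Budget", "baseline", "Baseline", "forecast", "Forecast"])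
--
--     if not (category_col and actual_col and baseline_col):
--         raise RuntimeError(f"Could not infer mapping. Found cols={sorted(cols)[:30]}")
--
--     return category_col, actual_col, baseline_col
-- ===== SOURCE B (Python) =====
-- CAT = ["category", "Category", "line_item", "lineItem", "account", "Account", "name", "Name"]
-- ACT = ["actual", "Actual", "value", "Value"]
-- BASE = ["budget", "Budget", "baseline", "Baseline", "forecast", "Forecast"]
--
--
-- def infer_mapping(rows: list[dict]):
--     """
--     Single pass over the data: for each group keep the best (lowest) candidate
--     rank seen among the keys, instead of picking candidates against a key set.
--     """
--     groups = (CAT, ACT, BASE)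
--     best = [len(g) for g in groups]
--     for r in rows:
--         for k in r:
--             for g, cands in enumerate(groups):
--                 try:
--                     i = cands.index(k)
--                 except ValueError:
--                     continue
--                 if i < best[g]:
--                     best[g] = i
--     if any(best[g] >= len(groups[g]) for g in range(3)):
--         cols = {k for r in rows for k in r}
--         raise RuntimeError(f"Could not infer mapping. Found cols={sorted(cols)[:30]}")
--     return tuple(groups[g][best[g]] for g in range(3))
-- ===== Notes on version B (the rewrite author's own statement) =====
-- stated objective: alternative
-- what changed: B inverts the traversal: instead of A's pick-first-candidate-present-in-a-key-set per group, B makes one pass over the data keys and keeps, per group, the minimum candidate rank seen (an argmin over key ranks), then reads each column name off its best rank.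
import Mathlib
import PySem

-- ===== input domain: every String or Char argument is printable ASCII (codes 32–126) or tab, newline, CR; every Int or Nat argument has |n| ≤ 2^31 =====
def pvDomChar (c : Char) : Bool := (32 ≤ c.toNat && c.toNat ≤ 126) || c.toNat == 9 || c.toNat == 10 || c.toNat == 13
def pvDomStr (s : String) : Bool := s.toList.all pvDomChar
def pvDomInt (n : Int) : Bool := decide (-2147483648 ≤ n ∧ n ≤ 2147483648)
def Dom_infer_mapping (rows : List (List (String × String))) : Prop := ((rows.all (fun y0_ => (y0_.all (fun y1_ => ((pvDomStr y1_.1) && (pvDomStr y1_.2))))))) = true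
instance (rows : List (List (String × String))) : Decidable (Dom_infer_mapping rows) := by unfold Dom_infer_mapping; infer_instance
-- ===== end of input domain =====

-- B replaces A's candidate-against-key-set picking by a single pass over the data keys that
-- keeps, per group, the lowest candidate rank seen; return value only
-- (A raises RuntimeError when a column cannot be inferred — those inputs are outside Pre_).

-- ===== PORT A =====
-- cols = set(); for r in rows: cols.update(r.keys())
def pvColsA (rows : List (List (String × String))) : PySem.Set String :=
  rows.foldl (fun s r => PySem.Set.update s (PySem.Dict.keys (PySem.Dict.mk r))) PySem.Set.empty

-- def pick(candidates): for c in candidates: if c in cols: return c; return None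
def pvPickA (cols : PySem.Set String) : List String → Option String
  | [] => none
  | c :: cs => if PySem.Set.contains cols c then some c else pvPickA cols cs

def infer_mapping (rows : List (List (String × String))) : String × String × String :=
  let cols := pvColsA rows
  let category_col := pvPickA cols ["category", "Category", "line_item", "lineItem", "account", "Account", "name", "Name"]
  let actual_col := pvPickA cols ["actual", "Actual", "value", "Value"]
  let baseline_col := pvPickA cols ["budget", "Budget", "baseline", "Baseline", "forecast", "Forecast"]
  match category_col, actual_col, baseline_col with
  | some a, some b, some c => (a, b, c)
  | _, _, _ => ("", "", "")   -- Python raises RuntimeError here; excluded by Pre_infer_mapping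

-- ===== PORT B =====
def pvCAT : List String := ["category", "Category", "line_item", "lineItem", "account", "Account", "name", "Name"]
def pvACT : List String := ["actual", "Actual", "value", "Value"]
def pvBASE : List String := ["budget", "Budget", "baseline", "Baseline", "forecast", "Forecast"]

-- inner 'for g, cands in enumerate(groups): i = cands.index(k) …; if i < best[g]: best[g] = i'
def pvGStep (cands : List String) (b : Nat) (k : String) : Nat :=
  match PySem.List.index? cands k with
  | some i => if i < b then i else b
  | none => b

-- 'for r in rows: for k in r: …' maintaining best = [b0, b1, b2]
def pvBest (rows : List (List (String × String))) : Nat × Nat × Nat :=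
  rows.foldl
    (fun b r => r.foldl
      (fun b kv => (pvGStep pvCAT b.1 kv.1, pvGStep pvACT b.2.1 kv.1, pvGStep pvBASE b.2.2 kv.1)) b)
    (pvCAT.length, pvACT.length, pvBASE.length)

def infer_mapping_alt (rows : List (List (String × String))) : String × String × String :=
  let b := pvBest rows
  if b.1 < pvCAT.length ∧ b.2.1 < pvACT.length ∧ b.2.2 < pvBASE.length then
    (pvCAT.getD b.1 "", pvACT.getD b.2.1 "", pvBASE.getD b.2.2 "")
  else ("", "", "")   -- Python raises RuntimeError here; excluded by Pre_infer_mapping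

-- ===== PRECONDITION & SPEC =====
-- Pre_ excludes exactly the inputs on which A raises RuntimeError: some row must carry a
-- candidate from each of the three candidate lists.
def pvHasCand (rows : List (List (String × String))) (cands : List String) : Bool :=
  cands.any (fun c => rows.any (fun r => r.any (fun kv => kv.1 == c)))

def Pre_infer_mapping (rows : List (List (String × String))) : Prop :=
  pvHasCand rows ["category", "Category", "line_item", "lineItem", "account", "Account", "name", "Name"] = true ∧
  pvHasCand rows ["actual", "Actual", "value", "Value"] = true ∧
  pvHasCand rows ["budget", "Budget", "baseline", "Baseline", "forecast", "Forecast"] = true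

instance (rows : List (List (String × String))) : Decidable (Pre_infer_mapping rows) := by
  unfold Pre_infer_mapping; infer_instance

def pvWitness_infer_mapping : (List (List (String × String))) :=
  [[("category", "rent"), ("actual", "10"), ("budget", "12")]]

def Spec_infer_mapping (rows : List (List (String × String))) (out : String × String × String) : Prop := out = infer_mapping_alt rows
instance (rows : List (List (String × String))) (out : String × String × String) : Decidable (Spec_infer_mapping rows out) := by unfold Spec_infer_mapping; infer_instance

-- ===== CLAIM (what is proved, stated in full; the proofs are below) =====
def Claim_equal_infer_mapping : Prop := ∀ (rows : List (List (String × String))), Dom_infer_mapping rows → Pre_infer_mapping rows → Spec_infer_mapping rows (infer_mapping rows)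

-- ===== LEMMAS AND PROOFS =====

-- the flattened key stream the data passes through B's fold
def pvKeys (rows : List (List (String × String))) : List String :=
  rows.flatMap (fun r => r.map Prod.fst)

-- A's accumulated key set contains c iff c occurs among the data keys
lemma mem_pvColsA (rows : List (List (String × String))) (c : String) :
    c ∈ pvColsA rows ↔ ∃ r ∈ rows, c ∈ (PySem.Dict.mk r).keys := by
  unfold pvColsA
  induction rows generalizing c with
  | nil => simp
  | cons r rs ih =>
    simp only [List.foldl_cons]
    have key : ∀ (l : List (List (String × String))) (s : PySem.Set String) (x : String),
        x ∈ l.foldl (fun s r => PySem.Set.update s (PySem.Dict.keys (PySem.Dict.mk r))) s ↔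
        x ∈ s ∨ x ∈ l.foldl (fun s r => PySem.Set.update s (PySem.Dict.keys (PySem.Dict.mk r))) [] := by
      intro l
      induction l with
      | nil => simp
      | cons a l ihl =>
        intro s x
        simp only [List.foldl_cons]
        rw [ihl, ihl (PySem.Set.update [] (PySem.Dict.keys (PySem.Dict.mk a)))]
        simp [PySem.Set.mem_update, or_assoc]
    constructor
    · intro h
      rw [key] at h
      rcases h with h | h
      · rw [PySem.Set.mem_update] at h
        rcases h with h | h
        · simp at h
        · exact ⟨r, by simp, h⟩
      · rcases (ih _).mp h with ⟨r', hr', hc⟩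
        exact ⟨r', by simp [hr'], hc⟩
    · rintro ⟨r', hr', hc⟩
      rw [key]
      rcases List.mem_cons.mp hr' with h | h
      · subst h; left; rw [PySem.Set.mem_update]; right; exact hc
      · right; exact (ih _).mpr ⟨r', h, hc⟩

lemma contains_pvColsA (rows : List (List (String × String))) (c : String) :
    PySem.Set.contains (pvColsA rows) c = (pvKeys rows).contains c := by
  have hm : c ∈ pvColsA rows ↔ c ∈ pvKeys rows := by
    rw [mem_pvColsA]
    constructor
    · rintro ⟨r, hr, hk⟩
      exact List.mem_flatMap.mpr ⟨r, hr, by simpa [PySem.Dict.keys_mk] using hk⟩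
    · intro h
      rcases List.mem_flatMap.mp h with ⟨r, hr, hc⟩
      exact ⟨r, hr, by simpa [PySem.Dict.keys_mk] using hc⟩
  by_cases h : c ∈ pvKeys rows
  · have h1 : PySem.Set.contains (pvColsA rows) c = true :=
      (PySem.Set.contains_iff _ _).mpr (hm.mpr h)
    rw [h1]
    simp [h]
  · have h1 : PySem.Set.contains (pvColsA rows) c ≠ true := by
      intro hc
      exact h (hm.mp ((PySem.Set.contains_iff _ _).mp hc))
    rw [Bool.eq_false_iff.mpr h1]
    simp [h]

-- A's pick is find? over the candidates, testing occurrence among the data keys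
lemma pickA_eq_find? (rows : List (List (String × String))) (cands : List String) :
    pvPickA (pvColsA rows) cands
      = cands.find? (fun c => (pvKeys rows).contains c) := by
  induction cands with
  | nil => rfl
  | cons c cs ih =>
    simp only [pvPickA, contains_pvColsA, ih]
    by_cases h : c ∈ pvKeys rows <;> simp [h]

-- B's nested fold over rows is the fold over the flattened key stream
lemma pvBest_flat (rows : List (List (String × String))) :
    pvBest rows
      = (pvKeys rows).foldl
          (fun b k => (pvGStep pvCAT b.1 k, pvGStep pvACT b.2.1 k, pvGStep pvBASE b.2.2 k))
          (pvCAT.length, pvACT.length, pvBASE.length) := by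
  unfold pvBest pvKeys
  generalize (pvCAT.length, pvACT.length, pvBASE.length) = init
  induction rows generalizing init with
  | nil => rfl
  | cons r rs ih =>
    simp only [List.foldl_cons, List.flatMap_cons, List.foldl_append, ih, List.foldl_map]

-- the tuple fold is the triple of componentwise folds
lemma pvBest_components (K : List String) (b : Nat × Nat × Nat) :
    K.foldl (fun b k => (pvGStep pvCAT b.1 k, pvGStep pvACT b.2.1 k, pvGStep pvBASE b.2.2 k)) b
      = (K.foldl (pvGStep pvCAT) b.1, K.foldl (pvGStep pvACT) b.2.1, K.foldl (pvGStep pvBASE) b.2.2) := by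
  induction K generalizing b with
  | nil => rfl
  | cons k ks ih => simp only [List.foldl_cons, ih]

-- once the best rank hits 0 it stays 0
lemma gstep_fold_zero (cands : List String) (K : List String) :
    K.foldl (pvGStep cands) 0 = 0 := by
  induction K with
  | nil => rfl
  | cons k _ ih =>
    simp only [List.foldl_cons]
    have : pvGStep cands 0 k = 0 := by
      unfold pvGStep; cases PySem.List.index? cands k <;> simp
    rw [this, ih]

-- dropping the head candidate shifts every rank (and the bound) by one
lemma gstep_fold_shift (c : String) (cs : List String) (K : List String) (b : Nat) :
    K.foldl (pvGStep (c :: cs)) (b + 1)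
      = if K.contains c then 0 else (K.foldl (pvGStep cs) b) + 1 := by
  induction K generalizing b with
  | nil => simp
  | cons k ks ih =>
    simp only [List.foldl_cons, List.contains_cons]
    by_cases hk : c = k
    · subst hk
      have h1 : pvGStep (c :: cs) (b + 1) c = 0 := by
        unfold pvGStep
        rw [PySem.List.index?_cons_self]
        simp
      simp [h1, gstep_fold_zero]
    · have hne : (c == k) = false := by simp [hk]
      have h1 : pvGStep (c :: cs) (b + 1) k = pvGStep cs b k + 1 := by
        unfold pvGStep
        rw [PySem.List.index?_cons_of_ne cs hk]
        cases PySem.List.index? cs k with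
        | none => simp
        | some i =>
          simp only [Option.map_some]
          by_cases hi : i < b <;> simp [hi]
      rw [hne, h1, ih]
      simp

-- B's per-group result agrees with A's find?: the least present candidate rank
lemma gstep_fold_find? (cands : List String) (K : List String) :
    (if h : K.foldl (pvGStep cands) cands.length < cands.length
       then some (cands.getD (K.foldl (pvGStep cands) cands.length) "")
       else none)
      = cands.find? (fun c => K.contains c) := by
  induction cands with
  | nil => simp
  | cons c cs ih =>
    have hsh := gstep_fold_shift c cs K cs.length
    by_cases hc : K.contains c = true
    · have hmem : c ∈ K := by simpa using hc
      simp only [List.length_cons] at *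
      rw [hsh]
      simp [hmem]
    · have hc' : K.contains c = false := by simpa using hc
      simp only [List.length_cons] at *
      rw [hsh, hc']
      simp only [Bool.false_eq_true, if_false, List.find?, hc']
      rw [← ih]
      by_cases h : K.foldl (pvGStep cs) cs.length < cs.length
      · rw [dif_pos (by omega), dif_pos h]
        simp [List.getD]
      · rw [dif_neg (by omega), dif_neg h]

-- ===== VERDICT (by name: the statement is the Claim_ definition above) =====
theorem infer_mapping_spec : Claim_equal_infer_mapping := by
  intro rows _ hpre
  show infer_mapping rows = infer_mapping_alt rows
  obtain ⟨h1, h2, h3⟩ := hpre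
  -- each group has a present candidate, so each find? succeeds
  have pres : ∀ cands : List String, pvHasCand rows cands = true →
      ∃ c, cands.find? (fun c => (pvKeys rows).contains c) = some c := by
    intro cands hcand
    rcases List.any_eq_true.mp hcand with ⟨c, hc, hin⟩
    rcases List.any_eq_true.mp hin with ⟨r, hr, hkv⟩
    rcases List.any_eq_true.mp hkv with ⟨kv, hkvmem, hkveq⟩
    have hmem : c ∈ pvKeys rows := by
      refine List.mem_flatMap.mpr ⟨r, hr, ?_⟩
      have : kv.1 = c := by simpa using hkveq
      exact this ▸ List.mem_map_of_mem hkvmem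
    have hs : (cands.find? (fun c => (pvKeys rows).contains c)).isSome = true := by
      rw [List.find?_isSome]
      exact ⟨c, hc, by simp [hmem]⟩
    exact Option.isSome_iff_exists.mp hs
  obtain ⟨a1, ha1⟩ := pres _ h1
  obtain ⟨a2, ha2⟩ := pres _ h2
  obtain ⟨a3, ha3⟩ := pres _ h3
  have e1 := gstep_fold_find? pvCAT (pvKeys rows)
  have e2 := gstep_fold_find? pvACT (pvKeys rows)
  have e3 := gstep_fold_find? pvBASE (pvKeys rows)
  rw [← show pvCAT = ["category", "Category", "line_item", "lineItem", "account", "Account", "name", "Name"] from rfl] at ha1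
  rw [← show pvACT = ["actual", "Actual", "value", "Value"] from rfl] at ha2
  rw [← show pvBASE = ["budget", "Budget", "baseline", "Baseline", "forecast", "Forecast"] from rfl] at ha3
  rw [ha1] at e1; rw [ha2] at e2; rw [ha3] at e3
  -- extract the bounds and values from the dite equalities
  unfold infer_mapping infer_mapping_alt
  rw [pvBest_flat, pvBest_components]
  rw [show ["category", "Category", "line_item", "lineItem", "account", "Account", "name", "Name"] = pvCAT from rfl,
      show ["actual", "Actual", "value", "Value"] = pvACT from rfl,
      show ["budget", "Budget", "baseline", "Baseline", "forecast", "Forecast"] = pvBASE from rfl]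
  simp only [pickA_eq_find?, ha1, ha2, ha3]
  split_ifs at e1 e2 e3 with hb1 hb2 hb3
  · rw [if_pos ⟨hb1, hb2, hb3⟩]
    simp only [Option.some.injEq, List.getD_eq_getElem?_getD] at e1 e2 e3
    simp only [List.getD_eq_getElem?_getD]
    rw [e1, e2, e3]
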